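-- pv_equiv track=rewrite | github.com/davidsenica/advent-of-code-2023 | src/advent_of_code_2023/day14.py | tilt_cycle
-- ===== SOURCE A (Python) =====
-- def tilt_cycle(rocks):
--     for j, column in enumerate(rocks[0]):
--         for i, row in enumerate(rocks):
--             if rocks[i][j] == 'O':
--                 k = i - 1
--                 while rocks[k][j] == '.' and k >= 0:
--                     rocks[k+1][j] = '.'
--                     rocks[k][j] = 'O'
--                     k -= 1
--     for i, row in enumerate(rocks):
--         for j, column in enumerate(rocks[0]):
--                 if rocks[i][j] == 'O':
--                     k = j - 1
--                     while rocks[i][k] == '.' and k >= 0: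
--                         rocks[i][k+1] = '.'
--                         rocks[i][k] = 'O'
--                         k -= 1
--     for j, column in enumerate(rocks[0]):
--         for i in range(len(rocks) - 1, -1, -1):
--             if rocks[i][j] == 'O':
--                 k = i + 1
--                 while k < len(rocks) and rocks[k][j] == '.':
--                     rocks[k-1][j] = '.'
--                     rocks[k][j] = 'O'
--                     k += 1
--     for i, row in enumerate(rocks):
--         for j in range(len(rocks[0]) - 1, -1, -1):
--             if rocks[i][j] == 'O':
--                 k = j + 1
--                 while k < len(rocks[0]) and rocks[i][k] == '.':
--                     rocks[i][k - 1] = '.'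
--                     rocks[i][k] = 'O'
--                     k += 1
--     return rocks
-- ===== SOURCE B (Python) =====
-- def tilt_cycle(rocks):
--     # One counting sweep per row/column (segment counting) instead of A's per-rock
--     # step-by-step movement. The grid is the w = len(rocks[0]) first cells of each row
--     # (anything beyond is untouched). Mutates rocks in place like A and returns it.
--     h, w = len(rocks), len(rocks[0])
--
--     def tilt(line):
--         # roll all 'O's toward index 0 within segments delimited by blockers
--         out = []
--         o = d = 0
--         for c in line:
--             if c == 'O':
--                 o += 1
--             elif c == '.':
--                 d += 1
--             else:
--                 out += ['O'] * o + ['.'] * d + [c]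
--                 o = d = 0
--         out += ['O'] * o + ['.'] * d
--         return out
--
--     # north
--     for j in range(w):
--         col = tilt([rocks[i][j] for i in range(h)])
--         for i in range(h):
--             rocks[i][j] = col[i]
--     # west
--     for i in range(h):
--         rocks[i][:w] = tilt(rocks[i][:w])
--     # south
--     for j in range(w):
--         col = tilt([rocks[i][j] for i in range(h)][::-1])[::-1]
--         for i in range(h):
--             rocks[i][j] = col[i]
--     # east
--     for i in range(h):
--         rocks[i][:w] = tilt(rocks[i][:w][::-1])[::-1]
--     return rocks
-- ===== Notes on version B (the rewrite author's own statement) =====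
-- stated objective: alternative
-- what changed: Each of the four tilts is computed by a single counting sweep per row/column (counting rocks and gaps per blocker-delimited segment and rewriting the whole line) instead of A's per-rock step-by-step bubbling.
import Mathlib
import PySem

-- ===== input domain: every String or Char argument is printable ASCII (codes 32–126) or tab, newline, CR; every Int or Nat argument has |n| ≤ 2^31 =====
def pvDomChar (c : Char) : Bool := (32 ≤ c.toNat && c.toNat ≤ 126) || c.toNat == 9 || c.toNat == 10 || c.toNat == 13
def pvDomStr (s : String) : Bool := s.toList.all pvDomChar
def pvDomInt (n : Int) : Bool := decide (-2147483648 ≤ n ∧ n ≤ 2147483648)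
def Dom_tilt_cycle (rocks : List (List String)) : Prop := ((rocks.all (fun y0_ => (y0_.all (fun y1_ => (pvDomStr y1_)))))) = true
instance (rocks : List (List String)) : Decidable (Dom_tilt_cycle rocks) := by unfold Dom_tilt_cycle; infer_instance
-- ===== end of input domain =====

-- B replaces A's per-rock step-by-step bubbling by one counting sweep per row/column
-- (objective: alternative algorithm). Both programs mutate `rocks` in place in Python and
-- return it; the equivalence proved here is about the returned value.

-- ===== PORT A =====
-- rocks[i][j] read with a default; inside Pre_ every read A performs is in range
-- (or guarded), so the default never reaches the returned value.
def getCell (g : List (List String)) (i j : Int) : String :=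
  PySem.List.pyGetD (PySem.List.pyGetD g i []) j ""

-- rocks[i][j] = v ; every write A performs has 0 ≤ i,j and is in range inside Pre_.
def setCell (g : List (List String)) (i j : Nat) (v : String) : List (List String) :=
  g.set i ((g.getD i []).set j v)

-- `while rocks[k][j] == '.' and k >= 0:` — at k = -1 Python evaluates rocks[-1][j]
-- harmlessly (wraparound) and then stops on `k >= 0`; the conjunction written with the
-- bound first is value-equal on every input.
def bubbleN (g : List (List String)) (j : Nat) (k : Int) : List (List String) :=
  if 0 ≤ k ∧ getCell g k j = "." then
    bubbleN (setCell (setCell g (k+1).toNat j ".") k.toNat j "O") j (k-1)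
  else g
termination_by (k+1).toNat
decreasing_by omega

def bubbleW (g : List (List String)) (i : Nat) (k : Int) : List (List String) :=
  if 0 ≤ k ∧ getCell g i k = "." then
    bubbleW (setCell (setCell g i (k+1).toNat ".") i k.toNat "O") i (k-1)
  else g
termination_by (k+1).toNat
decreasing_by omega

def bubbleS (g : List (List String)) (nR j : Nat) (k : Int) : List (List String) :=
  if k < (nR : Int) ∧ getCell g k j = "." then
    bubbleS (setCell (setCell g (k-1).toNat j ".") k.toNat j "O") nR j (k+1)
  else g
termination_by ((nR : Int) - k).toNat
decreasing_by omega

def bubbleE (g : List (List String)) (nC i : Nat) (k : Int) : List (List String) :=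
  if k < (nC : Int) ∧ getCell g i k = "." then
    bubbleE (setCell (setCell g i (k-1).toNat ".") i k.toNat "O") nC i (k+1)
  else g
termination_by ((nC : Int) - k).toNat
decreasing_by omega

-- the four passes, exactly A's loop nests; `range(len(rocks)-1, -1, -1)` is (List.range h).reverse
def tilt_cycle (rocks : List (List String)) : List (List String) :=
  let h := rocks.length
  let w := (rocks.headD []).length
  let g1 := (List.range w).foldl (fun g (j : Nat) =>
    (List.range h).foldl (fun g (i : Nat) =>
      if getCell g i j = "O" then bubbleN g j ((i : Int) - 1) else g) g) rocks
  let g2 := (List.range h).foldl (fun g (i : Nat) =>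
    (List.range w).foldl (fun g (j : Nat) =>
      if getCell g i j = "O" then bubbleW g i ((j : Int) - 1) else g) g) g1
  let g3 := (List.range w).foldl (fun g (j : Nat) =>
    ((List.range h).reverse).foldl (fun g (i : Nat) =>
      if getCell g i j = "O" then bubbleS g h j ((i : Int) + 1) else g) g) g2
  let g4 := (List.range h).foldl (fun g (i : Nat) =>
    ((List.range w).reverse).foldl (fun g (j : Nat) =>
      if getCell g i j = "O" then bubbleE g w i ((j : Int) + 1) else g) g) g3
  g4

-- ===== PORT B =====
-- Source B's tilt(line): one sweep counting rocks (o) and gaps (d) per blocker-delimited segment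
def tiltAux : List String → List String → Nat → Nat → List String
  | [], out, o, d => out ++ List.replicate o "O" ++ List.replicate d "."
  | c :: rest, out, o, d =>
    if c = "O" then tiltAux rest out (o+1) d
    else if c = "." then tiltAux rest out o (d+1)
    else tiltAux rest (out ++ List.replicate o "O" ++ List.replicate d "." ++ [c]) 0 0

def tiltLine (line : List String) : List String := tiltAux line [] 0 0

def tilt_cycle_alt (rocks : List (List String)) : List (List String) :=
  let h := rocks.length
  let w := (rocks.headD []).length
  let g1 := (List.range w).foldl (fun g (j : Nat) =>
    let c := tiltLine ((List.range h).map (fun i : Nat => getCell g i j))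
    (List.range h).foldl (fun g (i : Nat) => setCell g i j (c.getD i "")) g) rocks
  let g2 := (List.range h).foldl (fun g (i : Nat) =>
    g.set i (tiltLine ((g.getD i []).take w) ++ (g.getD i []).drop w)) g1
  let g3 := (List.range w).foldl (fun g (j : Nat) =>
    let c := (tiltLine (((List.range h).map (fun i : Nat => getCell g i j)).reverse)).reverse
    (List.range h).foldl (fun g (i : Nat) => setCell g i j (c.getD i "")) g) g2
  let g4 := (List.range h).foldl (fun g (i : Nat) =>
    g.set i ((tiltLine (((g.getD i []).take w).reverse)).reverse ++ (g.getD i []).drop w)) g3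
  g4

-- ===== PRECONDITION & SPEC =====
-- Pre_ excludes exactly the inputs on which A raises IndexError: the empty grid, and
-- grids where some row is shorter than the first row (A indexes every row at all
-- j < len(rocks[0])). On everything else A returns normally and B matches it.
def Pre_tilt_cycle (rocks : List (List String)) : Prop :=
  rocks ≠ [] ∧ ∀ r ∈ rocks, (rocks.headD []).length ≤ r.length
instance (rocks : List (List String)) : Decidable (Pre_tilt_cycle rocks) := by
  unfold Pre_tilt_cycle; infer_instance

def pvWitness_tilt_cycle : List (List String) := [["O", "."], [".", "#"], [".", "O"]]

def Spec_tilt_cycle (rocks : List (List String)) (out : List (List String)) : Prop :=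
  out = tilt_cycle_alt rocks
instance (rocks : List (List String)) (out : List (List String)) : Decidable (Spec_tilt_cycle rocks out) := by
  unfold Spec_tilt_cycle; infer_instance

-- ===== CLAIM (what is proved, stated in full; the proofs are below) =====
def Claim_equal_tilt_cycle : Prop := ∀ (rocks : List (List String)), Dom_tilt_cycle rocks → Pre_tilt_cycle rocks → Spec_tilt_cycle rocks (tilt_cycle rocks)

-- ===== LEMMAS AND PROOFS =====

-- grid shape: rows have exactly the lengths L (so row lengths are invariant),
-- and every row is at least ww wide (ww = width of the tilted part)
def Rect (L : List Nat) (ww : Nat) (g : List (List String)) : Prop :=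
  g.map List.length = L ∧ ∀ r ∈ g, ww ≤ r.length

-- column j of a grid, as a line
def colOf (g : List (List String)) (j : Nat) : List String := g.map (fun r => r.getD j "")

-- 1-D models of A's bubbling, acting on a single line
def bub1 (l : List String) (k : Int) : List String :=
  if 0 ≤ k ∧ l.getD k.toNat "" = "." then bub1 ((l.set (k+1).toNat ".").set k.toNat "O") (k-1) else l
termination_by (k+1).toNat
decreasing_by omega

def bub1R (n : Nat) (l : List String) (k : Int) : List String :=
  if k < (n : Int) ∧ l.getD k.toNat "" = "." then bub1R n ((l.set (k-1).toNat ".").set k.toNat "O") (k+1) else l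
termination_by ((n : Int) - k).toNat
decreasing_by omega

def stepL (l : List String) (i : Nat) : List String :=
  if l.getD i "" = "O" then bub1 l ((i : Int) - 1) else l

def stepR (n : Nat) (l : List String) (i : Nat) : List String :=
  if l.getD i "" = "O" then bub1R n l ((i : Int) + 1) else l

theorem length_bub1R (n : Nat) (l : List String) (k : Int) : (bub1R n l k).length = l.length := by
  have H : ∀ (fuel : Nat) (l : List String) (k : Int), ((n : Int) - k).toNat ≤ fuel →
      (bub1R n l k).length = l.length := by
    intro fuel
    induction fuel with
    | zero => intro l k hf; rw [bub1R, if_neg]; rintro ⟨h0, _⟩; omega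
    | succ m ih =>
      intro l k hf
      rw [bub1R]
      split_ifs with h
      · rw [ih _ _ (by obtain ⟨h0, _⟩ := h; omega)]; simp
      · rfl
  exact H (((n : Int) - k).toNat) l k le_rfl

theorem length_stepR (n : Nat) (l : List String) (i : Nat) : (stepR n l i).length = l.length := by
  unfold stepR; split
  · exact length_bub1R _ _ _
  · rfl

theorem length_tiltAux (l : List String) : ∀ (out : List String) (o d : Nat),
    (tiltAux l out o d).length = out.length + o + d + l.length := by
  induction l with
  | nil => intro out o d; simp [tiltAux]; omega
  | cons c rest ih =>
    intro out o d
    simp only [tiltAux]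
    split_ifs with h1 h2 <;> rw [ih] <;> simp <;> omega

theorem length_tiltLine (l : List String) : (tiltLine l).length = l.length := by
  simp [tiltLine, length_tiltAux]

theorem tiltAux_snoc_nonO (c : String) (hc : c ≠ "O") : ∀ (l out : List String) (o d : Nat),
    tiltAux (l ++ [c]) out o d = tiltAux l out o d ++ [c] := by
  intro l
  induction l with
  | nil =>
    intro out o d
    by_cases hd : c = "."
    · subst hd
      simp only [List.nil_append, tiltAux, if_neg hc]
      simp [List.replicate_succ', List.append_assoc]
    · simp only [List.nil_append, tiltAux, if_neg hc, if_neg hd]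
      simp
  | cons a rest ih =>
    intro out o d
    simp only [List.cons_append, tiltAux]
    split_ifs <;> apply ih

theorem tiltAux_shape (l : List String) : ∀ (out : List String) (o d : Nat),
    out.getLast? ≠ some "." →
    ∃ v dd, tiltAux l out o d = v ++ List.replicate dd "." ∧ v.getLast? ≠ some "." ∧
      tiltAux (l ++ ["O"]) out o d = v ++ "O" :: List.replicate dd "." := by
  induction l with
  | nil =>
    intro out o d hout
    refine ⟨out ++ List.replicate o "O", d, ?_, ?_, ?_⟩
    · simp [tiltAux, List.append_assoc]
    · cases o with
      | zero => simpa using hout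
      | succ m =>
        rw [List.replicate_succ', ← List.append_assoc, List.getLast?_concat]
        simp
    · simp only [List.nil_append, tiltAux]
      simp [List.replicate_succ', List.append_assoc]
  | cons a rest ih =>
    intro out o d hout
    simp only [List.cons_append, tiltAux]
    by_cases h1 : a = "O"
    · rw [if_pos h1, if_pos h1]; exact ih out (o+1) d hout
    · rw [if_neg h1, if_neg h1]
      by_cases h2 : a = "."
      · rw [if_pos h2, if_pos h2]; exact ih out o (d+1) hout
      · rw [if_neg h2, if_neg h2]
        refine ih _ 0 0 ?_
        rw [List.getLast?_concat]
        simp [h2]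

theorem tiltLine_snoc_nonO (c : String) (hc : c ≠ "O") (l : List String) :
    tiltLine (l ++ [c]) = tiltLine l ++ [c] := by
  simp only [tiltLine]
  exact tiltAux_snoc_nonO c hc l [] 0 0

theorem tilt_shape (l : List String) :
    ∃ v dd, tiltLine l = v ++ List.replicate dd "." ∧ v.getLast? ≠ some "." ∧
      tiltLine (l ++ ["O"]) = v ++ "O" :: List.replicate dd "." := by
  exact tiltAux_shape l [] 0 0 (by simp)

theorem bub1_spec : ∀ (d : Nat) (v r : List String), v.getLast? ≠ some "." →
    bub1 (v ++ List.replicate d "." ++ "O" :: r) ((v.length : Int) + d - 1)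
      = v ++ "O" :: List.replicate d "." ++ r := by
  intro d
  induction d with
  | zero =>
    intro v r hv
    rw [bub1, if_neg]
    · simp
    · rintro ⟨h0, hdot⟩
      simp only [Nat.cast_zero, add_zero] at h0 hdot
      have hvpos : 1 ≤ v.length := by omega
      rw [show ((v.length : Int) - 1).toNat = v.length - 1 from by omega] at hdot
      simp only [List.replicate_zero, List.append_nil] at hdot
      rw [List.getD_append _ _ _ _ (by omega)] at hdot
      apply hv
      rw [List.getLast?_eq_getElem?, List.getElem?_eq_getElem (by omega)]
      rw [List.getD_eq_getElem _ _ (by omega)] at hdot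
      rw [hdot]
  | succ d ih =>
    intro v r hv
    have hidx : (((v.length : Int) + ((d+1 : Nat) : Int) - 1)).toNat = v.length + d := by
      push_cast; omega
    have hidx1 : ((((v.length : Int) + ((d+1 : Nat) : Int) - 1)) + 1).toNat = v.length + d + 1 := by
      push_cast; omega
    have hguard : 0 ≤ ((v.length : Int) + ((d+1 : Nat) : Int) - 1) ∧
        (v ++ List.replicate (d+1) "." ++ "O" :: r).getD
          (((v.length : Int) + ((d+1 : Nat) : Int) - 1)).toNat "" = "." := by
      refine ⟨by push_cast; omega, ?_⟩
      rw [hidx]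
      rw [List.getD_append _ _ _ _ (by simp only [List.length_append, List.length_replicate]; omega)]
      rw [List.getD_append_right _ _ _ _ (by omega)]
      rw [show v.length + d - v.length = d from by omega]
      rw [List.getD_replicate _ (by omega)]
    rw [bub1, if_pos hguard, hidx, hidx1]
    have hset : (((v ++ List.replicate (d+1) "." ++ "O" :: r).set (v.length + d + 1) ".").set (v.length + d) "O")
        = v ++ List.replicate d "." ++ "O" :: "." :: r := by
      rw [List.replicate_succ' (n := d)]
      have e1 : v ++ (List.replicate d "." ++ ["."]) ++ "O" :: r
          = (v ++ List.replicate d ".") ++ "." :: "O" :: r := by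
        simp [List.append_assoc]
      rw [e1]
      have hlen1 : (v ++ List.replicate d ".").length = v.length + d := by simp
      rw [List.set_append_right _ _ (by omega), hlen1]
      rw [show (v.length + d + 1) - (v.length + d) = 1 from by omega]
      rw [show ("." :: "O" :: r).set 1 "." = "." :: "." :: r from rfl]
      rw [List.set_append_right _ _ (by omega), hlen1]
      rw [show (v.length + d) - (v.length + d) = 0 from by omega]
      rw [show ("." :: "." :: r).set 0 "O" = "O" :: "." :: r from rfl]
    rw [hset]
    rw [show ((v.length : Int) + ((d+1 : Nat) : Int) - 1) - 1 = (v.length : Int) + d - 1 from by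
      push_cast; ring]
    rw [ih v ("." :: r) hv]
    simp [List.replicate_succ', List.append_assoc]

theorem loopL_inv (l : List String) : ∀ (m : Nat), m ≤ l.length →
    (List.range m).foldl stepL l = tiltLine (l.take m) ++ l.drop m := by
  intro m
  induction m with
  | zero => intro _; simp [tiltLine, tiltAux]
  | succ m ih =>
    intro hm
    rw [List.range_succ, List.foldl_append, ih (by omega)]
    simp only [List.foldl_cons, List.foldl_nil]
    have hmlt : m < l.length := by omega
    have hlen : (tiltLine (l.take m)).length = m := by
      rw [length_tiltLine, List.length_take]; omega
    have hdrop : l.drop m = l[m] :: l.drop (m+1) := List.drop_eq_getElem_cons hmlt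
    have hget : (tiltLine (l.take m) ++ l.drop m).getD m "" = l[m] := by
      rw [List.getD_append_right _ _ _ _ (by omega), hlen, Nat.sub_self, hdrop]
      rfl
    unfold stepL
    rw [hget]
    have e3 : l.take (m+1) = l.take m ++ [l[m]] := (List.take_append_getElem hmlt).symm
    by_cases hO : l[m] = "O"
    · rw [if_pos hO]
      obtain ⟨v, dd, h1, h2, h3⟩ := tilt_shape (l.take m)
      have hm' : m = v.length + dd := by
        have := congrArg List.length h1
        rw [hlen] at this; simpa using this
      have e1 : tiltLine (l.take m) ++ l.drop m = v ++ List.replicate dd "." ++ "O" :: l.drop (m+1) := by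
        rw [h1, hdrop]; try rw [hO]
        try simp [List.append_assoc]
      rw [e1]
      rw [show ((m : Int) - 1) = ((v.length : Int) + dd - 1) from by omega]
      rw [bub1_spec dd v _ h2]
      rw [e3, hO]
      try rw [h3]
      try simp [List.append_assoc]
    · rw [if_neg hO]
      rw [e3, tiltLine_snoc_nonO _ hO]
      rw [hdrop]
      try simp [List.append_assoc]

theorem loopL_eq_tilt (l : List String) : (List.range l.length).foldl stepL l = tiltLine l := by
  rw [loopL_inv l l.length le_rfl]; simp

theorem reverse_set (l : List String) (i : Nat) (h : i < l.length) (v : String) :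
    (l.set i v).reverse = l.reverse.set (l.length - 1 - i) v := by
  apply List.ext_getElem
  · simp
  · intro m hm1 hm2
    have hm : m < l.length := by simpa using hm1
    simp only [List.length_set] at hm1 hm2 ⊢
    rw [List.getElem_reverse]
    simp only [List.length_set]
    rw [List.getElem_set, List.getElem_set]
    by_cases he : i = l.length - 1 - m
    · rw [if_pos he, if_pos (by omega)]
    · rw [if_neg he, if_neg (by omega)]
      rw [List.getElem_reverse]

theorem bub1R_mirror : ∀ (fuel : Nat) (n : Nat) (l : List String) (k : Int),
    ((n : Int) - k).toNat ≤ fuel → l.length = n → 1 ≤ k →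
    bub1R n l k = (bub1 l.reverse ((n : Int) - 1 - k)).reverse := by
  intro fuel
  induction fuel with
  | zero =>
    intro n l k hf hl hk
    rw [bub1R, if_neg (by rintro ⟨h1, _⟩; omega)]
    rw [bub1, if_neg (by rintro ⟨h1, _⟩; omega)]
    simp
  | succ fuel ih =>
    intro n l k hf hl hk
    have hiff : (k < (n : Int) ∧ l.getD k.toNat "" = ".")
        ↔ (0 ≤ (n : Int) - 1 - k ∧ l.reverse.getD ((n : Int) - 1 - k).toNat "" = ".") := by
      constructor
      · rintro ⟨h1, h2⟩
        refine ⟨by omega, ?_⟩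
        rw [List.getD_reverse _ (by omega)]
        rw [show l.length - 1 - ((n : Int) - 1 - k).toNat = k.toNat by omega]
        exact h2
      · rintro ⟨h1, h2⟩
        refine ⟨by omega, ?_⟩
        rw [List.getD_reverse _ (by omega)] at h2
        rw [show l.length - 1 - ((n : Int) - 1 - k).toNat = k.toNat by omega] at h2
        exact h2
    rw [bub1R, bub1]
    by_cases h : k < (n : Int) ∧ l.getD k.toNat "" = "."
    · rw [if_pos h, if_pos (hiff.mp h)]
      have hkn : k.toNat < l.length := by omega
      have hkn1 : (k-1).toNat < l.length := by omega
      have hX : ((l.set (k-1).toNat ".").set k.toNat "O").reverse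
          = (l.reverse.set (((n : Int) - 1 - k) + 1).toNat ".").set ((n : Int) - 1 - k).toNat "O" := by
        rw [reverse_set _ _ (by simpa using hkn), reverse_set _ _ hkn1]
        rw [List.length_set]
        congr 2 <;> omega
      rw [← hX]
      have hrec := ih n ((l.set (k-1).toNat ".").set k.toNat "O") (k+1)
        (by omega) (by simp [hl]) (by omega)
      rw [hrec]
      congr 2
      omega
    · rw [if_neg h, if_neg (fun hb => h (hiff.mpr hb)), List.reverse_reverse]

theorem stepR_mirror (l : List String) (i : Nat) (hi : i < l.length) :
    (stepR l.length l i).reverse = stepL l.reverse (l.length - 1 - i) := by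
  unfold stepR stepL
  have hg : l.reverse.getD (l.length - 1 - i) "" = l.getD i "" := by
    rw [List.getD_reverse _ (by omega)]
    congr 1
    omega
  rw [hg]
  split_ifs with h
  · have := bub1R_mirror (((l.length : Int) - (i+1)).toNat) l.length l ((i : Int) + 1)
      le_rfl rfl (by omega)
    rw [this, List.reverse_reverse]
    congr 1
    omega
  · rfl

theorem foldR_mirror : ∀ (idxs : List Nat) (l : List String), (∀ i ∈ idxs, i < l.length) →
    idxs.foldl (stepR l.length) l
      = ((idxs.map (fun i => l.length - 1 - i)).foldl stepL l.reverse).reverse := by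
  intro idxs
  induction idxs with
  | nil => intro l _; simp
  | cons a t ih =>
    intro l hmem
    simp only [List.foldl_cons, List.map_cons]
    have hlen := length_stepR l.length l a
    have hstep := stepR_mirror l a (hmem a (by simp))
    rw [← hstep]
    have := ih (stepR l.length l a) (fun i hi => by rw [hlen]; exact hmem i (by simp [hi]))
    rw [hlen] at this
    exact this

theorem map_mirror_reverse_range (n : Nat) :
    ((List.range n).reverse).map (fun i => n - 1 - i) = List.range n := by
  apply List.ext_getElem
  · simp
  · intro i h1 h2
    simp only [List.length_map, List.length_reverse, List.length_range] at h1
    simp only [List.getElem_map, List.getElem_reverse, List.getElem_range, List.length_range]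
    omega

theorem loopR_eq (l : List String) :
    ((List.range l.length).reverse).foldl (stepR l.length) l = (tiltLine l.reverse).reverse := by
  rw [foldR_mirror _ _ (fun i hi => List.mem_range.mp (List.mem_reverse.mp hi))]
  rw [map_mirror_reverse_range]
  have := loopL_eq_tilt l.reverse
  rw [List.length_reverse] at this
  rw [this]

-- 2-D bridge lemmas
theorem pyGetD_toNat {α : Type} (xs : List α) (i : Int) (d : α) (h : 0 ≤ i) :
    PySem.List.pyGetD xs i d = xs.getD i.toNat d := by
  rcases Int.eq_ofNat_of_zero_le h with ⟨n, rfl⟩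
  rw [PySem.List.pyGetD_natCast]
  simp

theorem getCell_col (g : List (List String)) (j : Nat) (k : Int) (hk : 0 ≤ k) :
    getCell g k (j : Int) = (colOf g j).getD k.toNat "" := by
  unfold getCell colOf
  rw [pyGetD_toNat _ _ _ hk, PySem.List.pyGetD_natCast]
  by_cases h : k.toNat < g.length
  · have h2 : k.toNat < (g.map (fun r => r.getD j "")).length := by simpa using h
    rw [List.getD_eq_getElem (g.map (fun r => r.getD j "")) "" h2, List.getElem_map,
      List.getD_eq_getElem g [] h]
  · rw [List.getD_eq_default g [] (by omega),
      List.getD_eq_default (g.map (fun r => r.getD j "")) "" (by simp; omega)]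
    simp

theorem rect_setCell {L : List Nat} {ww : Nat} {g : List (List String)} (h : Rect L ww g) (i j : Nat) (v : String) :
    Rect L ww (setCell g i j v) := by
  by_cases hi : i < g.length
  · obtain ⟨hl, hr⟩ := h
    constructor
    · show (g.set i ((g.getD i []).set j v)).map List.length = L
      rw [List.map_set, List.length_set, List.getD_eq_getElem g [] hi]
      rw [show g[i].length = (g.map List.length)[i]'(by simpa using hi) from (List.getElem_map _).symm]
      rw [List.set_getElem_self]
      exact hl
    · intro r hrm
      rcases List.mem_or_eq_of_mem_set hrm with hm | heq
      · exact hr r hm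
      · subst heq
        rw [List.length_set, List.getD_eq_getElem g [] hi]
        exact hr _ (List.getElem_mem _)
  · have hset : setCell g i j v = g := by
      unfold setCell; exact List.set_eq_of_length_le (by omega)
    rw [hset]; exact h

theorem colOf_setCell_self {L : List Nat} {ww : Nat} {g : List (List String)} (h : Rect L ww g)
    (i j : Nat) (hj : j < ww) (v : String) :
    colOf (setCell g i j v) j = (colOf g j).set i v := by
  by_cases hi : i < g.length
  · unfold setCell colOf
    rw [List.map_set]
    congr 1
    have hrl : ww ≤ (g.getD i []).length := by
      rw [List.getD_eq_getElem g [] hi]; exact h.2 _ (List.getElem_mem _)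
    rw [List.getD_eq_getElem _ _ (by rw [List.length_set]; omega)]
    rw [List.getElem_set_self]
  · have hset : setCell g i j v = g := by
      unfold setCell; exact List.set_eq_of_length_le (by omega)
    rw [hset, List.set_eq_of_length_le (by simp [colOf]; omega)]

theorem getD_set_ne {α : Type} (l : List α) (j j' : Nat) (h : j ≠ j') (v d : α) :
    (l.set j v).getD j' d = l.getD j' d := by
  by_cases hlt : j' < l.length
  · rw [List.getD_eq_getElem (l.set j v) d (by simpa using hlt), List.getD_eq_getElem l d hlt]
    exact List.getElem_set_ne h _
  · rw [List.getD_eq_default (l.set j v) d (by simp; omega), List.getD_eq_default l d (by omega)]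

theorem colOf_setCell_ne (g : List (List String)) (i j j' : Nat) (hj' : j' ≠ j) (v : String) :
    colOf (setCell g i j v) j' = colOf g j' := by
  by_cases hi : i < g.length
  · unfold setCell colOf
    rw [List.map_set]
    rw [getD_set_ne _ _ _ (by omega) _ _, List.getD_eq_getElem g [] hi]
    have hmap : g[i].getD j' "" = (g.map (fun r => r.getD j' ""))[i]'(by simpa using hi) := by
      rw [List.getElem_map]
    rw [hmap]
    exact List.set_getElem_self _
  · have hset : setCell g i j v = g := by
      unfold setCell; exact List.set_eq_of_length_le (by omega)
    rw [hset]

theorem bubN_sim {L : List Nat} {ww : Nat} : ∀ (fuel : Nat) (g : List (List String)) (j : Nat) (k : Int),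
    (k+1).toNat ≤ fuel → Rect L ww g → j < ww →
    colOf (bubbleN g j k) j = bub1 (colOf g j) k ∧
    (∀ j', j' ≠ j → colOf (bubbleN g j k) j' = colOf g j') ∧
    Rect L ww (bubbleN g j k) := by
  intro fuel
  induction fuel with
  | zero =>
    intro g j k hf hrect hj
    rw [bubbleN, bub1]
    rw [if_neg (by rintro ⟨h0, _⟩; omega), if_neg (by rintro ⟨h0, _⟩; omega)]
    exact ⟨rfl, fun _ _ => rfl, hrect⟩
  | succ fuel ih =>
    intro g j k hf hrect hj
    rw [bubbleN, bub1]
    by_cases h : 0 ≤ k ∧ getCell g k j = "."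
    · rw [if_pos h, if_pos ⟨h.1, by rw [← getCell_col g j k h.1]; exact h.2⟩]
      have r1 := rect_setCell hrect ((k+1).toNat) j "."
      have r2 := rect_setCell r1 (k.toNat) j "O"
      have hcol : colOf (setCell (setCell g (k+1).toNat j ".") k.toNat j "O") j
          = ((colOf g j).set (k+1).toNat ".").set k.toNat "O" := by
        rw [colOf_setCell_self r1 _ _ hj, colOf_setCell_self hrect _ _ hj]
      obtain ⟨ih1, ih2, ih3⟩ := ih _ j (k-1) (by obtain ⟨h0, _⟩ := h; omega) r2 hj
      refine ⟨?_, ?_, ih3⟩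
      · rw [ih1, hcol]
      · intro j' hj'
        rw [ih2 j' hj', colOf_setCell_ne _ _ _ _ hj', colOf_setCell_ne _ _ _ _ hj']
    · rw [if_neg h, if_neg (fun hb => h ⟨hb.1, by rw [getCell_col g j k hb.1]; exact hb.2⟩)]
      exact ⟨rfl, fun _ _ => rfl, hrect⟩

theorem bubS_sim {L : List Nat} {ww : Nat} (hh : Nat) : ∀ (fuel : Nat) (g : List (List String)) (j : Nat) (k : Int),
    ((hh : Int) - k).toNat ≤ fuel → Rect L ww g → j < ww → 0 ≤ k →
    colOf (bubbleS g hh j k) j = bub1R hh (colOf g j) k ∧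
    (∀ j', j' ≠ j → colOf (bubbleS g hh j k) j' = colOf g j') ∧
    Rect L ww (bubbleS g hh j k) := by
  intro fuel
  induction fuel with
  | zero =>
    intro g j k hf hrect hj hk
    rw [bubbleS, bub1R]
    rw [if_neg (by rintro ⟨h0, _⟩; omega), if_neg (by rintro ⟨h0, _⟩; omega)]
    exact ⟨rfl, fun _ _ => rfl, hrect⟩
  | succ fuel ih =>
    intro g j k hf hrect hj hk
    rw [bubbleS, bub1R]
    by_cases h : k < (hh : Int) ∧ getCell g k j = "."
    · rw [if_pos h, if_pos ⟨h.1, by rw [← getCell_col g j k hk]; exact h.2⟩]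
      have r1 := rect_setCell hrect ((k-1).toNat) j "."
      have r2 := rect_setCell r1 (k.toNat) j "O"
      have hcol : colOf (setCell (setCell g (k-1).toNat j ".") k.toNat j "O") j
          = ((colOf g j).set (k-1).toNat ".").set k.toNat "O" := by
        rw [colOf_setCell_self r1 _ _ hj, colOf_setCell_self hrect _ _ hj]
      obtain ⟨ih1, ih2, ih3⟩ := ih _ j (k+1) (by obtain ⟨h0, _⟩ := h; omega) r2 hj (by omega)
      refine ⟨?_, ?_, ih3⟩
      · rw [ih1, hcol]
      · intro j' hj'
        rw [ih2 j' hj', colOf_setCell_ne _ _ _ _ hj', colOf_setCell_ne _ _ _ _ hj']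
    · rw [if_neg h, if_neg (fun hb => h ⟨hb.1, by rw [getCell_col g j k hk]; exact hb.2⟩)]
      exact ⟨rfl, fun _ _ => rfl, hrect⟩

theorem bubW_sim : ∀ (fuel : Nat) (g : List (List String)) (i : Nat) (k : Int),
    (k+1).toNat ≤ fuel → i < g.length →
    bubbleW g i k = g.set i (bub1 (g.getD i []) k) := by
  intro fuel
  induction fuel with
  | zero =>
    intro g i k hf hi
    rw [bubbleW, bub1]
    rw [if_neg (by rintro ⟨h0, _⟩; omega), if_neg (by rintro ⟨h0, _⟩; omega)]
    rw [List.getD_eq_getElem _ _ hi, List.set_getElem_self]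
  | succ fuel ih =>
    intro g i k hf hi
    have hcell : ∀ (kk : Int), 0 ≤ kk → getCell g i kk = (g.getD i []).getD kk.toNat "" := by
      intro kk h0
      unfold getCell
      rw [PySem.List.pyGetD_natCast, pyGetD_toNat _ _ _ h0]
    rw [bubbleW, bub1]
    by_cases h : 0 ≤ k ∧ getCell g (i : Int) k = "."
    · rw [if_pos h, if_pos ⟨h.1, by rw [← hcell k h.1]; exact h.2⟩]
      have h1 : (g.set i ((g.getD i []).set (k+1).toNat ".")).getD i [] = (g.getD i []).set (k+1).toNat "." := by
        rw [List.getD_eq_getElem _ _ (by simpa using hi), List.getElem_set_self]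
      have hrow : setCell (setCell g i (k+1).toNat ".") i k.toNat "O"
          = g.set i (((g.getD i []).set (k+1).toNat ".").set k.toNat "O") := by
        simp only [setCell, h1, List.set_set]
      rw [hrow]
      have hrec := ih (g.set i (((g.getD i []).set (k+1).toNat ".").set k.toNat "O")) i (k-1)
        (by obtain ⟨h0, _⟩ := h; omega) (by simpa using hi)
      rw [hrec]
      have h2 : (g.set i (((g.getD i []).set (k+1).toNat ".").set k.toNat "O")).getD i []
          = ((g.getD i []).set (k+1).toNat ".").set k.toNat "O" := by
        rw [List.getD_eq_getElem _ _ (by simpa using hi), List.getElem_set_self]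
      rw [h2, List.set_set]
    · rw [if_neg h, if_neg (fun hb => h ⟨hb.1, by rw [hcell k hb.1]; exact hb.2⟩)]
      rw [List.getD_eq_getElem _ _ hi, List.set_getElem_self]

theorem bubE_sim (ww : Nat) : ∀ (fuel : Nat) (g : List (List String)) (i : Nat) (k : Int),
    ((ww : Int) - k).toNat ≤ fuel → i < g.length → 0 ≤ k →
    bubbleE g ww i k = g.set i (bub1R ww (g.getD i []) k) := by
  intro fuel
  induction fuel with
  | zero =>
    intro g i k hf hi hk
    rw [bubbleE, bub1R]
    rw [if_neg (by rintro ⟨h0, _⟩; omega), if_neg (by rintro ⟨h0, _⟩; omega)]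
    rw [List.getD_eq_getElem _ _ hi, List.set_getElem_self]
  | succ fuel ih =>
    intro g i k hf hi hk
    have hcell : ∀ (kk : Int), 0 ≤ kk → getCell g i kk = (g.getD i []).getD kk.toNat "" := by
      intro kk h0
      unfold getCell
      rw [PySem.List.pyGetD_natCast, pyGetD_toNat _ _ _ h0]
    rw [bubbleE, bub1R]
    by_cases h : k < (ww : Int) ∧ getCell g (i : Int) k = "."
    · rw [if_pos h, if_pos ⟨h.1, by rw [← hcell k hk]; exact h.2⟩]
      have h1 : (g.set i ((g.getD i []).set (k-1).toNat ".")).getD i [] = (g.getD i []).set (k-1).toNat "." := by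
        rw [List.getD_eq_getElem _ _ (by simpa using hi), List.getElem_set_self]
      have hrow : setCell (setCell g i (k-1).toNat ".") i k.toNat "O"
          = g.set i (((g.getD i []).set (k-1).toNat ".").set k.toNat "O") := by
        simp only [setCell, h1, List.set_set]
      rw [hrow]
      have hrec := ih (g.set i (((g.getD i []).set (k-1).toNat ".").set k.toNat "O")) i (k+1)
        (by obtain ⟨h0, _⟩ := h; omega) (by simpa using hi) (by omega)
      rw [hrec]
      have h2 : (g.set i (((g.getD i []).set (k-1).toNat ".").set k.toNat "O")).getD i []
          = ((g.getD i []).set (k-1).toNat ".").set k.toNat "O" := by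
        rw [List.getD_eq_getElem _ _ (by simpa using hi), List.getElem_set_self]
      rw [h2, List.set_set]
    · rw [if_neg h, if_neg (fun hb => h ⟨hb.1, by rw [hcell k hk]; exact hb.2⟩)]
      rw [List.getD_eq_getElem _ _ hi, List.set_getElem_self]

-- generic fold congruence under an invariant
theorem foldc {σ ι : Type} (idxs : List ι) (f₁ f₂ : σ → ι → σ) (P : σ → Prop) :
    ∀ (s : σ), (∀ s i, P s → i ∈ idxs → f₁ s i = f₂ s i) → (∀ s i, P s → i ∈ idxs → P (f₁ s i)) → P s →
    idxs.foldl f₁ s = idxs.foldl f₂ s := by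
  induction idxs with
  | nil => intros; rfl
  | cons a t ih =>
    intro s heq hpres hP
    simp only [List.foldl_cons]
    rw [← heq s a hP (by simp)]
    exact ih _ (fun s i hs hi => heq s i hs (by simp [hi]))
      (fun s i hs hi => hpres s i hs (by simp [hi])) (hpres _ _ hP (by simp))

theorem foldP {σ ι : Type} (idxs : List ι) (f : σ → ι → σ) (P : σ → Prop) :
    ∀ (s : σ), (∀ s i, P s → i ∈ idxs → P (f s i)) → P s → P (idxs.foldl f s) := by
  induction idxs with
  | nil => intro s _ h; exact h
  | cons a t ih =>
    intro s hpres h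
    exact ih _ (fun s i hs hi => hpres s i hs (by simp [hi])) (hpres _ _ h (by simp))

-- column-pass simulations (idxs arbitrary; instantiated with range hh or its reverse)
theorem colfoldN {L : List Nat} {ww : Nat} (hh : Nat) (j : Nat) (hj : j < ww) :
    ∀ (idxs : List Nat) (g : List (List String)), Rect L ww g →
    Rect L ww (idxs.foldl (fun s (i : Nat) => if getCell s i j = "O" then bubbleN s j ((i : Int) - 1) else s) g) ∧
    colOf (idxs.foldl (fun s (i : Nat) => if getCell s i j = "O" then bubbleN s j ((i : Int) - 1) else s) g) j
      = idxs.foldl stepL (colOf g j) ∧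
    (∀ j', j' ≠ j → colOf (idxs.foldl (fun s (i : Nat) => if getCell s i j = "O" then bubbleN s j ((i : Int) - 1) else s) g) j' = colOf g j') := by
  intro idxs
  induction idxs with
  | nil => intro g hg; exact ⟨hg, rfl, fun _ _ => rfl⟩
  | cons a t ih =>
    intro g hg
    simp only [List.foldl_cons]
    have hga : getCell g (a : Int) (j : Int) = (colOf g j).getD a "" := by
      rw [getCell_col g j _ (by omega)]; simp
    by_cases hO : (colOf g j).getD a "" = "O"
    · rw [if_pos (by rw [hga]; exact hO)]
      have hs := bubN_sim (L := L) (ww := ww) (((a : Int) - 1 + 1).toNat) g j ((a : Int) - 1) le_rfl hg hj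
      obtain ⟨s1, s2, s3⟩ := hs
      obtain ⟨R, C, U⟩ := ih _ s3
      refine ⟨R, ?_, ?_⟩
      · rw [C, s1]
        have : stepL (colOf g j) a = bub1 (colOf g j) ((a : Int) - 1) := by
          unfold stepL; rw [if_pos hO]
        rw [this]
      · intro j' hj'
        rw [U j' hj', s2 j' hj']
    · rw [if_neg (by rw [hga]; exact hO)]
      obtain ⟨R, C, U⟩ := ih g hg
      refine ⟨R, ?_, U⟩
      rw [C]
      have : stepL (colOf g j) a = colOf g j := by unfold stepL; rw [if_neg hO]
      rw [this]

theorem colfoldS {L : List Nat} {ww : Nat} (hh : Nat) (j : Nat) (hj : j < ww) :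
    ∀ (idxs : List Nat) (g : List (List String)), Rect L ww g →
    Rect L ww (idxs.foldl (fun s (i : Nat) => if getCell s i j = "O" then bubbleS s hh j ((i : Int) + 1) else s) g) ∧
    colOf (idxs.foldl (fun s (i : Nat) => if getCell s i j = "O" then bubbleS s hh j ((i : Int) + 1) else s) g) j
      = idxs.foldl (stepR hh) (colOf g j) ∧
    (∀ j', j' ≠ j → colOf (idxs.foldl (fun s (i : Nat) => if getCell s i j = "O" then bubbleS s hh j ((i : Int) + 1) else s) g) j' = colOf g j') := by
  intro idxs
  induction idxs with
  | nil => intro g hg; exact ⟨hg, rfl, fun _ _ => rfl⟩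
  | cons a t ih =>
    intro g hg
    simp only [List.foldl_cons]
    have hga : getCell g (a : Int) (j : Int) = (colOf g j).getD a "" := by
      rw [getCell_col g j _ (by omega)]; simp
    by_cases hO : (colOf g j).getD a "" = "O"
    · rw [if_pos (by rw [hga]; exact hO)]
      have hs := bubS_sim (L := L) (ww := ww) hh (((hh : Int) - ((a : Int) + 1)).toNat) g j ((a : Int) + 1) le_rfl hg hj (by omega)
      obtain ⟨s1, s2, s3⟩ := hs
      obtain ⟨R, C, U⟩ := ih _ s3
      refine ⟨R, ?_, ?_⟩
      · rw [C, s1]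
        have : stepR hh (colOf g j) a = bub1R hh (colOf g j) ((a : Int) + 1) := by
          unfold stepR; rw [if_pos hO]
        rw [this]
      · intro j' hj'
        rw [U j' hj', s2 j' hj']
    · rw [if_neg (by rw [hga]; exact hO)]
      obtain ⟨R, C, U⟩ := ih g hg
      refine ⟨R, ?_, U⟩
      rw [C]
      have : stepR hh (colOf g j) a = colOf g j := by unfold stepR; rw [if_neg hO]
      rw [this]

theorem colfoldB {L : List Nat} {ww : Nat} (j : Nat) (hj : j < ww) (c : List String) :
    ∀ (idxs : List Nat) (g : List (List String)), Rect L ww g →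
    Rect L ww (idxs.foldl (fun s (i : Nat) => setCell s i j (c.getD i "")) g) ∧
    colOf (idxs.foldl (fun s (i : Nat) => setCell s i j (c.getD i "")) g) j
      = idxs.foldl (fun t (i : Nat) => t.set i (c.getD i "")) (colOf g j) ∧
    (∀ j', j' ≠ j → colOf (idxs.foldl (fun s (i : Nat) => setCell s i j (c.getD i "")) g) j' = colOf g j') := by
  intro idxs
  induction idxs with
  | nil => intro g hg; exact ⟨hg, rfl, fun _ _ => rfl⟩
  | cons a t ih =>
    intro g hg
    simp only [List.foldl_cons]
    have r1 := rect_setCell hg a j (c.getD a "")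
    obtain ⟨R, C, U⟩ := ih _ r1
    refine ⟨R, ?_, ?_⟩
    · rw [C, colOf_setCell_self hg _ _ hj]
    · intro j' hj'
      rw [U j' hj', colOf_setCell_ne _ _ _ _ hj']

theorem write_range (n : Nat) (c t : List String) (ht : t.length = n) (hc : c.length = n) :
    (List.range n).foldl (fun t (i : Nat) => t.set i (c.getD i "")) t = c := by
  have H : ∀ (m : Nat), m ≤ n →
      (List.range m).foldl (fun t (i : Nat) => t.set i (c.getD i "")) t = c.take m ++ t.drop m := by
    intro m
    induction m with
    | zero => intro _; simp
    | succ m ihm =>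
      intro hm
      rw [List.range_succ, List.foldl_append, ihm (by omega)]
      simp only [List.foldl_cons, List.foldl_nil]
      have hlt : m < n := by omega
      have hlen : (c.take m).length = m := by rw [List.length_take]; omega
      rw [List.set_append_right _ _ (by omega)]
      rw [hlen]
      have e2 : m - m = 0 := by omega
      rw [e2]
      rw [List.drop_eq_getElem_cons (by omega : m < t.length)]
      rw [List.set_cons_zero]
      rw [List.getD_eq_getElem c "" (by omega)]
      have e6 := (List.take_append_getElem (show m < c.length by omega)).symm
      rw [e6]
      simp only [List.append_assoc, List.singleton_append]
  rw [H n le_rfl]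
  rw [show n = t.length from ht.symm, List.drop_length]
  rw [show t.length = c.length from by omega, List.take_length, List.append_nil]

theorem mapget_col (g : List (List String)) (j : Nat) :
    (List.range g.length).map (fun i : Nat => getCell g i j) = colOf g j := by
  apply List.ext_getElem
  · simp [colOf]
  · intro i h1 h2
    simp only [List.getElem_map, List.getElem_range]
    rw [getCell_col g j _ (by omega)]
    rw [show ((i : Nat) : Int).toNat = i from by omega]
    rw [List.getD_eq_getElem _ _ h2]

theorem grid_ext {L : List Nat} {ww : Nat} {g₁ g₂ : List (List String)} (h1 : Rect L ww g₁) (h2 : Rect L ww g₂)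
    (hc : ∀ j', colOf g₁ j' = colOf g₂ j') : g₁ = g₂ := by
  have e1 : g₁.length = L.length := by rw [← h1.1]; simp
  have e2 : g₂.length = L.length := by rw [← h2.1]; simp
  apply List.ext_getElem (by omega)
  intro i hi1 hi2
  have hr1 : g₁[i].length = g₂[i].length := by
    have hfoo := congrArg (fun l => l.getD i 0) (h1.1.trans h2.1.symm)
    simp only at hfoo
    rw [List.getD_eq_getElem (g₁.map List.length) 0 (by simpa using hi1),
      List.getD_eq_getElem (g₂.map List.length) 0 (by simpa using hi2),
      List.getElem_map, List.getElem_map] at hfoo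
    exact hfoo
  apply List.ext_getElem hr1
  intro j hj1 hj2
  have hcj := hc j
  have e3 : g₁[i].getD j "" = (colOf g₁ j)[i]'(by simpa [colOf] using hi1) := by
    simp [colOf]
  have e4 : g₂[i].getD j "" = (colOf g₂ j)[i]'(by simpa [colOf] using hi2) := by
    simp [colOf]
  have : g₁[i].getD j "" = g₂[i].getD j "" := by
    rw [e3, e4]
    congr 1
  rw [List.getD_eq_getElem _ _ hj1, List.getD_eq_getElem _ _ hj2] at this
  exact this

-- row-pass simulations
-- row-pass simulations
theorem rowfoldW (idxs : List Nat) (g : List (List String)) (i : Nat) (hi : i < g.length) :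
    ∀ (t : List String),
    idxs.foldl (fun s (j : Nat) => if getCell s i j = "O" then bubbleW s i ((j : Int) - 1) else s) (g.set i t)
      = g.set i (idxs.foldl stepL t) := by
  induction idxs with
  | nil => intro t; simp
  | cons a rest ih =>
    intro t
    simp only [List.foldl_cons]
    have hgd : (g.set i t).getD i [] = t := by
      rw [List.getD_eq_getElem _ _ (by simpa using hi), List.getElem_set_self]
    have hcell : getCell (g.set i t) (i : Int) (a : Int) = t.getD a "" := by
      unfold getCell
      rw [PySem.List.pyGetD_natCast (g.set i t) i [], hgd, PySem.List.pyGetD_natCast t a ""]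
    rw [hcell]
    by_cases hO : t.getD a "" = "O"
    · rw [if_pos hO]
      have hb := bubW_sim (((a : Int) - 1 + 1).toNat) (g.set i t) i ((a : Int) - 1) le_rfl (by simpa using hi)
      rw [hb, hgd, List.set_set]
      rw [ih]
      rw [show stepL t a = bub1 t ((a : Int) - 1) from by unfold stepL; rw [if_pos hO]]
    · rw [if_neg hO]
      rw [ih]
      rw [show stepL t a = t from by unfold stepL; rw [if_neg hO]]

theorem rowfoldE (ww : Nat) (idxs : List Nat) (g : List (List String)) (i : Nat) (hi : i < g.length) :
    ∀ (t : List String),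
    idxs.foldl (fun s (j : Nat) => if getCell s i j = "O" then bubbleE s ww i ((j : Int) + 1) else s) (g.set i t)
      = g.set i (idxs.foldl (stepR ww) t) := by
  induction idxs with
  | nil => intro t; simp
  | cons a rest ih =>
    intro t
    simp only [List.foldl_cons]
    have hgd : (g.set i t).getD i [] = t := by
      rw [List.getD_eq_getElem _ _ (by simpa using hi), List.getElem_set_self]
    have hcell : getCell (g.set i t) (i : Int) (a : Int) = t.getD a "" := by
      unfold getCell
      rw [PySem.List.pyGetD_natCast (g.set i t) i [], hgd, PySem.List.pyGetD_natCast t a ""]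
    rw [hcell]
    by_cases hO : t.getD a "" = "O"
    · rw [if_pos hO]
      have hb := bubE_sim ww (((ww : Int) - ((a : Int) + 1)).toNat) (g.set i t) i ((a : Int) + 1) le_rfl (by simpa using hi) (by omega)
      rw [hb, hgd, List.set_set]
      rw [ih]
      rw [show stepR ww t a = bub1R ww t ((a : Int) + 1) from by unfold stepR; rw [if_pos hO]]
    · rw [if_neg hO]
      rw [ih]
      rw [show stepR ww t a = t from by unfold stepR; rw [if_neg hO]]

-- single-column / single-row step equalities between A and B
theorem colstep_eqN {L : List Nat} {ww hh : Nat} (g : List (List String)) (hg : Rect L ww g)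
    (hgh : g.length = hh) (j : Nat) (hj : j < ww) :
    (List.range hh).foldl (fun s (i : Nat) => if getCell s i j = "O" then bubbleN s j ((i : Int) - 1) else s) g
      = (List.range hh).foldl (fun s (i : Nat) => setCell s i j ((tiltLine ((List.range hh).map (fun i : Nat => getCell g i j))).getD i "")) g := by
  obtain ⟨RA, CA, UA⟩ := colfoldN (L := L) (ww := ww) hh j hj (List.range hh) g hg
  have hcol : (List.range hh).map (fun i : Nat => getCell g (i : Int) (j : Int)) = colOf g j := by
    rw [show hh = g.length from hgh.symm]
    exact mapget_col g j
  obtain ⟨RB, CB, UB⟩ := colfoldB (L := L) (ww := ww) j hj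
    (tiltLine ((List.range hh).map (fun i : Nat => getCell g i j))) (List.range hh) g hg
  have hl : (colOf g j).length = hh := by simp [colOf, hgh]
  apply grid_ext RA RB
  intro j'
  by_cases hjj : j' = j
  · subst hjj
    rw [CA, CB]
    rw [write_range hh _ _ hl (by rw [length_tiltLine]; simp [hcol, hl])]
    rw [hcol]
    rw [show List.range hh = List.range (colOf g j').length from by rw [hl]]
    rw [loopL_eq_tilt]
  · rw [UA j' hjj, UB j' hjj]

theorem colstep_eqS {L : List Nat} {ww hh : Nat} (g : List (List String)) (hg : Rect L ww g)
    (hgh : g.length = hh) (j : Nat) (hj : j < ww) :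
    ((List.range hh).reverse).foldl (fun s (i : Nat) => if getCell s i j = "O" then bubbleS s hh j ((i : Int) + 1) else s) g
      = (List.range hh).foldl (fun s (i : Nat) => setCell s i j (((tiltLine (((List.range hh).map (fun i : Nat => getCell g i j)).reverse)).reverse).getD i "")) g := by
  obtain ⟨RA, CA, UA⟩ := colfoldS (L := L) (ww := ww) hh j hj ((List.range hh).reverse) g hg
  have hcol : (List.range hh).map (fun i : Nat => getCell g (i : Int) (j : Int)) = colOf g j := by
    rw [show hh = g.length from hgh.symm]
    exact mapget_col g j
  obtain ⟨RB, CB, UB⟩ := colfoldB (L := L) (ww := ww) j hj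
    ((tiltLine (((List.range hh).map (fun i : Nat => getCell g i j)).reverse)).reverse) (List.range hh) g hg
  have hl : (colOf g j).length = hh := by simp [colOf, hgh]
  apply grid_ext RA RB
  intro j'
  by_cases hjj : j' = j
  · subst hjj
    rw [CA, CB]
    rw [write_range hh _ _ hl (by rw [List.length_reverse, length_tiltLine, List.length_reverse]; simp [hcol, hl])]
    rw [hcol]
    rw [show (List.range hh).reverse = (List.range (colOf g j').length).reverse from by rw [hl]]
    rw [show stepR hh = stepR (colOf g j').length from by rw [hl]]
    rw [loopR_eq]
  · rw [UA j' hjj, UB j' hjj]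

theorem row_lengthGE {L : List Nat} {ww : Nat} {g : List (List String)} (hg : Rect L ww g) (i : Nat)
    (hi : i < g.length) : ww ≤ (g.getD i []).length := by
  rw [List.getD_eq_getElem g [] hi]
  exact hg.2 _ (List.getElem_mem _)

theorem rowstep_eqW {L : List Nat} {ww : Nat} (g : List (List String)) (hg : Rect L ww g)
    (i : Nat) (hi : i < g.length) :
    (List.range ww).foldl (fun s (j : Nat) => if getCell s i j = "O" then bubbleW s i ((j : Int) - 1) else s) g
      = g.set i (tiltLine ((g.getD i []).take ww) ++ (g.getD i []).drop ww) := by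
  have hle : ww ≤ (g.getD i []).length := row_lengthGE hg i hi
  conv_lhs => rw [show g = g.set i (g.getD i []) from by rw [List.getD_eq_getElem _ _ hi, List.set_getElem_self]]
  rw [rowfoldW _ _ _ hi]
  congr 1
  exact loopL_inv (g.getD i []) ww hle

-- A's right-bubbling over the first ww cells never touches the tail of a longer row
theorem bub1R_append (n : Nat) : ∀ (fuel : Nat) (u t : List String) (k : Int),
    ((n : Int) - k).toNat ≤ fuel → u.length = n → 0 ≤ k →
    bub1R n (u ++ t) k = bub1R n u k ++ t := by
  intro fuel
  induction fuel with
  | zero =>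
    intro u t k hf hu hk
    conv_lhs => rw [bub1R]
    conv_rhs => rw [bub1R]
    rw [if_neg (by rintro ⟨h1, _⟩; omega), if_neg (by rintro ⟨h1, _⟩; omega)]
  | succ fuel ih =>
    intro u t k hf hu hk
    have hiff : (k < (n : Int) ∧ (u ++ t).getD k.toNat "" = ".")
        ↔ (k < (n : Int) ∧ u.getD k.toNat "" = ".") := by
      constructor <;> rintro ⟨h1, h2⟩ <;> refine ⟨h1, ?_⟩
      · rw [List.getD_append _ _ _ _ (by omega)] at h2; exact h2
      · rw [List.getD_append _ _ _ _ (by omega)]; exact h2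
    conv_lhs => rw [bub1R]
    conv_rhs => rw [bub1R]
    by_cases h : k < (n : Int) ∧ (u ++ t).getD k.toNat "" = "."
    · rw [if_pos h, if_pos (hiff.mp h)]
      have e1 : (u ++ t).set (k-1).toNat "." = u.set (k-1).toNat "." ++ t := by
        rw [List.set_append, if_pos (by omega)]
      have e2 : (u.set (k-1).toNat "." ++ t).set k.toNat "O" = (u.set (k-1).toNat ".").set k.toNat "O" ++ t := by
        rw [List.set_append, if_pos (by simp; omega)]
      rw [e1, e2]
      exact ih _ t (k+1) (by omega) (by simp [hu]) (by omega)
    · rw [if_neg h, if_neg (fun hb => h (hiff.mpr hb))]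

theorem stepR_append (n : Nat) (u t : List String) (hu : u.length = n) (i : Nat) (hi : i < n) :
    stepR n (u ++ t) i = stepR n u i ++ t := by
  unfold stepR
  rw [List.getD_append _ _ _ _ (by omega)]
  split_ifs with h
  · exact bub1R_append n (((n : Int) - ((i : Int) + 1)).toNat) u t ((i : Int) + 1) le_rfl hu (by omega)
  · rfl

theorem foldR_append (n : Nat) : ∀ (idxs : List Nat) (u t : List String), u.length = n →
    (∀ i ∈ idxs, i < n) →
    idxs.foldl (stepR n) (u ++ t) = idxs.foldl (stepR n) u ++ t := by
  intro idxs
  induction idxs with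
  | nil => intro u t _ _; rfl
  | cons a rest ih =>
    intro u t hu hmem
    simp only [List.foldl_cons]
    rw [stepR_append n u t hu a (hmem a (by simp))]
    exact ih (stepR n u a) t ((length_stepR n u a).trans hu) (fun i hi => hmem i (by simp [hi]))

theorem rowstep_eqE {L : List Nat} {ww : Nat} (g : List (List String)) (hg : Rect L ww g)
    (i : Nat) (hi : i < g.length) :
    ((List.range ww).reverse).foldl (fun s (j : Nat) => if getCell s i j = "O" then bubbleE s ww i ((j : Int) + 1) else s) g
      = g.set i ((tiltLine (((g.getD i []).take ww).reverse)).reverse ++ (g.getD i []).drop ww) := by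
  have hle : ww ≤ (g.getD i []).length := row_lengthGE hg i hi
  conv_lhs => rw [show g = g.set i (g.getD i []) from by rw [List.getD_eq_getElem _ _ hi, List.set_getElem_self]]
  rw [rowfoldE ww _ _ _ hi]
  congr 1
  have hu : ((g.getD i []).take ww).length = ww := by rw [List.length_take]; omega
  conv_lhs => rw [show g.getD i [] = (g.getD i []).take ww ++ (g.getD i []).drop ww from (List.take_append_drop ww _).symm]
  rw [foldR_append ww ((List.range ww).reverse) _ _ hu
    (fun x hx => List.mem_range.mp (List.mem_reverse.mp hx))]
  congr 1
  rw [show (List.range ww).reverse = (List.range ((g.getD i []).take ww).length).reverse from by rw [hu]]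
  rw [show stepR ww = stepR ((g.getD i []).take ww).length from by rw [hu]]
  exact loopR_eq _

theorem rect_set_row {L : List Nat} {ww : Nat} {g : List (List String)} (hg : Rect L ww g) (i : Nat)
    (x : List String) (hx : x.length = (g.getD i []).length) (hwx : ww ≤ x.length) :
    Rect L ww (g.set i x) := by
  by_cases hi : i < g.length
  · obtain ⟨hl, hr⟩ := hg
    constructor
    · rw [List.map_set, hx, List.getD_eq_getElem g [] hi]
      rw [show g[i].length = (g.map List.length)[i]'(by simpa using hi) from (List.getElem_map _).symm]
      rw [List.set_getElem_self]
      exact hl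
    · intro r hrm
      rcases List.mem_or_eq_of_mem_set hrm with hm | heq
      · exact hr r hm
      · subst heq; exact hwx
  · rw [List.set_eq_of_length_le (by omega)]; exact hg

-- ===== VERDICT (by name: the statement is the Claim_ definition above) =====
theorem tilt_cycle_spec : Claim_equal_tilt_cycle := by
  intro rocks _ hpre
  obtain ⟨hne, hrows⟩ := hpre
  unfold Spec_tilt_cycle
  show tilt_cycle rocks = tilt_cycle_alt rocks
  simp only [tilt_cycle, tilt_cycle_alt]
  set hh := rocks.length with hhdef
  set ww := (rocks.headD []).length with hwdef
  have hR : Rect (rocks.map List.length) ww rocks := ⟨rfl, hrows⟩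
  have hlen : ∀ s : List (List String), Rect (rocks.map List.length) ww s → s.length = hh := by
    intro s hs
    have h' := congrArg List.length hs.1
    rw [hhdef]
    simpa using h'
  -- pass 1: north
  have E1 :
      (List.range ww).foldl (fun g (j : Nat) =>
        (List.range hh).foldl (fun g (i : Nat) =>
          if getCell g i j = "O" then bubbleN g j ((i : Int) - 1) else g) g) rocks
      = (List.range ww).foldl (fun g (j : Nat) =>
        let c := tiltLine ((List.range hh).map (fun i : Nat => getCell g i j))
        (List.range hh).foldl (fun g (i : Nat) => setCell g i j (c.getD i "")) g) rocks := by
    refine foldc _ _ _ (Rect (rocks.map List.length) ww) rocks ?_ ?_ hR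
    · intro s j hs hj
      exact colstep_eqN s hs (hlen s hs) j (List.mem_range.mp hj)
    · intro s j hs hj
      exact (colfoldN hh j (List.mem_range.mp hj) (List.range hh) s hs).1
  rw [E1]
  set g1 := (List.range ww).foldl (fun g (j : Nat) =>
        let c := tiltLine ((List.range hh).map (fun i : Nat => getCell g i j))
        (List.range hh).foldl (fun g (i : Nat) => setCell g i j (c.getD i "")) g) rocks with hg1
  have R1 : Rect (rocks.map List.length) ww g1 := by
    rw [hg1]
    refine foldP _ _ (Rect (rocks.map List.length) ww) rocks ?_ hR
    intro s j hs hj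
    exact (colfoldB j (List.mem_range.mp hj) _ (List.range hh) s hs).1
  -- pass 2: west
  have E2 :
      (List.range hh).foldl (fun g (i : Nat) =>
        (List.range ww).foldl (fun g (j : Nat) =>
          if getCell g i j = "O" then bubbleW g i ((j : Int) - 1) else g) g) g1
      = (List.range hh).foldl (fun g (i : Nat) =>
        g.set i (tiltLine ((g.getD i []).take ww) ++ (g.getD i []).drop ww)) g1 := by
    refine foldc _ _ _ (Rect (rocks.map List.length) ww) g1 ?_ ?_ R1
    · intro s i hs hi
      exact rowstep_eqW s hs i (by rw [hlen s hs]; exact List.mem_range.mp hi)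
    · intro s i hs hi
      have hi' : i < s.length := by rw [hlen s hs]; exact List.mem_range.mp hi
      rw [rowstep_eqW s hs i hi']
      have hge := row_lengthGE hs i hi'
      refine rect_set_row hs i _ ?_ ?_
      · rw [List.length_append, length_tiltLine, List.length_take, List.length_drop]; omega
      · rw [List.length_append, length_tiltLine, List.length_take]; omega
  rw [E2]
  set g2 := (List.range hh).foldl (fun g (i : Nat) =>
        g.set i (tiltLine ((g.getD i []).take ww) ++ (g.getD i []).drop ww)) g1 with hg2
  have R2 : Rect (rocks.map List.length) ww g2 := by
    rw [hg2]
    refine foldP _ _ (Rect (rocks.map List.length) ww) g1 ?_ R1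
    intro s i hs hi
    have hi' : i < s.length := by rw [hlen s hs]; exact List.mem_range.mp hi
    have hge := row_lengthGE hs i hi'
    refine rect_set_row hs i _ ?_ ?_
    · rw [List.length_append, length_tiltLine, List.length_take, List.length_drop]; omega
    · rw [List.length_append, length_tiltLine, List.length_take]; omega
  -- pass 3: south
  have E3 :
      (List.range ww).foldl (fun g (j : Nat) =>
        ((List.range hh).reverse).foldl (fun g (i : Nat) =>
          if getCell g i j = "O" then bubbleS g hh j ((i : Int) + 1) else g) g) g2
      = (List.range ww).foldl (fun g (j : Nat) =>
        let c := (tiltLine (((List.range hh).map (fun i : Nat => getCell g i j)).reverse)).reverse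
        (List.range hh).foldl (fun g (i : Nat) => setCell g i j (c.getD i "")) g) g2 := by
    refine foldc _ _ _ (Rect (rocks.map List.length) ww) g2 ?_ ?_ R2
    · intro s j hs hj
      exact colstep_eqS s hs (hlen s hs) j (List.mem_range.mp hj)
    · intro s j hs hj
      exact (colfoldS hh j (List.mem_range.mp hj) ((List.range hh).reverse) s hs).1
  rw [E3]
  set g3 := (List.range ww).foldl (fun g (j : Nat) =>
        let c := (tiltLine (((List.range hh).map (fun i : Nat => getCell g i j)).reverse)).reverse
        (List.range hh).foldl (fun g (i : Nat) => setCell g i j (c.getD i "")) g) g2 with hg3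
  have R3 : Rect (rocks.map List.length) ww g3 := by
    rw [hg3]
    refine foldP _ _ (Rect (rocks.map List.length) ww) g2 ?_ R2
    intro s j hs hj
    exact (colfoldB j (List.mem_range.mp hj) _ (List.range hh) s hs).1
  -- pass 4: east
  have E4 :
      (List.range hh).foldl (fun g (i : Nat) =>
        ((List.range ww).reverse).foldl (fun g (j : Nat) =>
          if getCell g i j = "O" then bubbleE g ww i ((j : Int) + 1) else g) g) g3
      = (List.range hh).foldl (fun g (i : Nat) =>
        g.set i ((tiltLine (((g.getD i []).take ww).reverse)).reverse ++ (g.getD i []).drop ww)) g3 := by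
    refine foldc _ _ _ (Rect (rocks.map List.length) ww) g3 ?_ ?_ R3
    · intro s i hs hi
      exact rowstep_eqE s hs i (by rw [hlen s hs]; exact List.mem_range.mp hi)
    · intro s i hs hi
      have hi' : i < s.length := by rw [hlen s hs]; exact List.mem_range.mp hi
      rw [rowstep_eqE s hs i hi']
      have hge := row_lengthGE hs i hi'
      refine rect_set_row hs i _ ?_ ?_
      · rw [List.length_append, List.length_reverse, length_tiltLine, List.length_reverse,
          List.length_take, List.length_drop]
        omega
      · rw [List.length_append, List.length_reverse, length_tiltLine, List.length_reverse,
          List.length_take]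
        omega
  rw [E4]
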